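-- pv_equiv track=rewrite | github.com/CarnifX/financeManager | main_program_window.py | add_list_values
-- ===== SOURCE A (Python) =====
-- def add_list_values(amounts, names):
--     finished_product = {}
--
--     for name, amount in zip(names, amounts):
--         if name in finished_product:
--             finished_product[name] += amount
--         else:
--             finished_product[name] = amount
--
--     return list(finished_product.keys()), list(finished_product.values())
-- ===== SOURCE B (Python) =====
-- def add_list_values(amounts, names):
--     pairs = list(zip(names, amounts))
--     unique = list(dict.fromkeys(n for n, _ in pairs))
--     totals = [sum(a for n, a in pairs if n == name) for name in unique]
--     return unique, totals
-- ===== Notes on version B (the rewrite author's own statement) =====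
-- stated objective: alternative
-- what changed: Replaces A's single accumulating dict pass with a build-key-list-then-rescan structure: first the ordered distinct names via dict.fromkeys, then one filtered sum over the zipped pairs per distinct name.
import Mathlib
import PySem

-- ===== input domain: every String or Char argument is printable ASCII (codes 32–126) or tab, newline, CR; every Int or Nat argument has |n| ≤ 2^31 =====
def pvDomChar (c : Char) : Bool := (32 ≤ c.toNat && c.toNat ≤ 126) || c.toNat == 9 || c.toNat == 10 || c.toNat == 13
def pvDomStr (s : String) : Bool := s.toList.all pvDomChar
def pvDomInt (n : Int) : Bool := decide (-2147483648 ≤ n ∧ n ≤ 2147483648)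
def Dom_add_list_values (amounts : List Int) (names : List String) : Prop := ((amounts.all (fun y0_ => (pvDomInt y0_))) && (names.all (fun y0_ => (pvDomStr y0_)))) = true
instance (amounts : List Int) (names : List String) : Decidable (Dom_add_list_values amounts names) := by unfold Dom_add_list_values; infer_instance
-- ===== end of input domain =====

-- B replaces A's single accumulating-dict pass by: build the ordered distinct-name list, then one filtered sum per distinct name (alternative decomposition, same results).


-- ===== PORT A =====
def add_list_values (amounts : List Int) (names : List String) : List String × List Int :=
  let finished_product : PySem.Dict String Int :=
    (names.zip amounts).foldl
      (fun d p =>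
        if d.contains p.1 then d.insert p.1 (d.getD p.1 0 + p.2)
        else d.insert p.1 p.2)
      PySem.Dict.empty
  (finished_product.keys, finished_product.values)

-- ===== PORT B =====
def add_list_values_alt (amounts : List Int) (names : List String) : List String × List Int :=
  let pairs := names.zip amounts
  let unique := PySem.List.dedup (pairs.map (·.1))
  let totals := unique.map (fun name => ((pairs.filter (fun p => p.1 == name)).map (·.2)).sum)
  (unique, totals)

-- ===== PRECONDITION & SPEC =====
def Spec_add_list_values (amounts : List Int) (names : List String) (out : List String × List Int) : Prop := out = add_list_values_alt amounts names
instance (amounts : List Int) (names : List String) (out : List String × List Int) : Decidable (Spec_add_list_values amounts names out) := by unfold Spec_add_list_values; infer_instance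

-- ===== CLAIM (what is proved, stated in full; the proofs are below) =====
def Claim_equal_add_list_values : Prop := ∀ (amounts : List Int) (names : List String), Dom_add_list_values amounts names → Spec_add_list_values amounts names (add_list_values amounts names)

-- ===== LEMMAS AND PROOFS =====

-- A's two branches are one insert: on the not-contains branch getD is 0.
theorem step_eq (d : PySem.Dict String Int) (p : String × Int) :
    (if d.contains p.1 then d.insert p.1 (d.getD p.1 0 + p.2) else d.insert p.1 p.2)
      = d.insert p.1 (d.getD p.1 0 + p.2) := by
  split
  · rfl
  · rename_i h
    rw [PySem.Dict.getD_of_not_contains d 0 (by simpa using h), zero_add]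

-- lookup in A's accumulating dict = initial value + sum of the amounts filed under that key
theorem getD_foldl_insert_add (l : List (String × Int)) (d : PySem.Dict String Int) (k : String) :
    (l.foldl (fun d p => d.insert p.1 (d.getD p.1 0 + p.2)) d).getD k 0
      = d.getD k 0 + ((l.filter (fun p => p.1 == k)).map (·.2)).sum := by
  induction l generalizing d with
  | nil => simp
  | cons p t ih =>
    simp only [List.foldl_cons, List.filter_cons]
    by_cases h : p.1 = k
    · subst h
      rw [ih]
      simp
      ring
    · rw [ih]
      have hb : (p.1 == k) = false := by simpa using h
      simp [hb, PySem.Dict.getD_insert, Ne.symm h]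

-- ===== VERDICT (by name: the statement is the Claim_ definition above) =====
theorem add_list_values_spec : Claim_equal_add_list_values := by
  intro amounts names _
  unfold Spec_add_list_values add_list_values add_list_values_alt
  have hstep : (fun (d : PySem.Dict String Int) (p : String × Int) =>
      if d.contains p.1 then d.insert p.1 (d.getD p.1 0 + p.2) else d.insert p.1 p.2)
      = fun d p => d.insert p.1 (d.getD p.1 0 + p.2) :=
    funext fun d => funext fun p => step_eq d p
  rw [hstep]
  set l := names.zip amounts with hl
  set D := l.foldl (fun d p => d.insert p.1 (d.getD p.1 0 + p.2)) PySem.Dict.empty with hD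
  have hkeys : D.keys = PySem.List.dedup (l.map (·.1)) := by
    rw [hD, PySem.Dict.keys_foldl_insert_key]
    simp [PySem.Set.update_nil_left]
  have hnd : D.keys.Nodup := by
    rw [hkeys]; exact PySem.List.nodup_dedup _
  have hvals : D.values = D.keys.map (fun k => D.getD k 0) :=
    PySem.Dict.values_eq_map_keys D hnd 0
  refine Prod.ext ?_ ?_
  · simpa using hkeys
  · show D.values = _
    rw [hvals, hkeys]
    refine List.map_congr_left (fun k _ => ?_)
    rw [hD, getD_foldl_insert_add]
    simp
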